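-- pv_equiv track=rewrite | github.com/gbcolborne/ner_eval | eval/eval_utils.py | convert_bio2_to_bilou
-- ===== SOURCE A (Python) =====
-- def get_bio2_mention_offsets(labels):
--     """ Given a list of BIO-2 labels, find mention boundaries, return
--     start offsets and end offsets of the mentions. """
--     offsets = []
--     prefixes = [x[0] for x in labels]
--     # Pad labels with an extra O at the end to avoid going out of
--     # bounds when we look for the end offset of the mentons we find
--     prefixes.append("O")
--     i = 0
--     while i < len(labels):
--         prefix = prefixes[i]
--         if prefix == "B":
--             end = i
--             while prefixes[end+1][0] == "I":
--                 end += 1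
--             offsets.append((i, end))
--             i = end + 1
--         else:
--             i += 1
--     return offsets
--
-- def convert_bio2_to_bilou(labels):
--     """ Given a list of BIO-2 labels, return list of corresponding BILOU labels. """
--     offsets = get_bio2_mention_offsets(labels)
--     bilou_labels = ["O" for _ in range(len(labels))]
--     for (beg, end) in offsets:
--         etype = labels[beg][2:]
--         length = 1  + end - beg
--         if length > 1:
--             bilou_labels[beg] = "B-{}".format(etype)
--             bilou_labels[end] = "L-{}".format(etype)
--             for ins in range(beg+1,end):
--                 bilou_labels[ins] = "I-{}".format(etype)
--         else:
--             bilou_labels[beg] = "U-{}".format(etype)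
--     return bilou_labels
-- ===== SOURCE B (Python) =====
-- def convert_bio2_to_bilou(labels):
--     """ Given a list of BIO-2 labels, return list of corresponding BILOU labels. """
--     bilou = []
--     inside = False
--     cur = ""
--     n = len(labels)
--     for i, lab in enumerate(labels):
--         p = lab[0]
--         nxt = labels[i + 1][0] if i + 1 < n else "O"
--         if p == "B":
--             cur = lab[2:]
--             if nxt == "I":
--                 bilou.append("B-" + cur)
--                 inside = True
--             else:
--                 bilou.append("U-" + cur)
--                 inside = False
--         elif p == "I" and inside:
--             if nxt == "I":
--                 bilou.append("I-" + cur)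
--             else:
--                 bilou.append("L-" + cur)
--                 inside = False
--         else:
--             bilou.append("O")
--             inside = False
--     return bilou
-- ===== Notes on version B (the rewrite author's own statement) =====
-- stated objective: simpler
-- what changed: Replaces the two-phase design (scan for mention (start,end) offsets with a nested lookahead while-loop, then overwrite an all-'O' output array segment by segment) with a single linear pass that emits each BILOU tag directly from the current label, one-token lookahead and an 'inside mention' flag carrying the type of the most recent B.
import Mathlib
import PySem

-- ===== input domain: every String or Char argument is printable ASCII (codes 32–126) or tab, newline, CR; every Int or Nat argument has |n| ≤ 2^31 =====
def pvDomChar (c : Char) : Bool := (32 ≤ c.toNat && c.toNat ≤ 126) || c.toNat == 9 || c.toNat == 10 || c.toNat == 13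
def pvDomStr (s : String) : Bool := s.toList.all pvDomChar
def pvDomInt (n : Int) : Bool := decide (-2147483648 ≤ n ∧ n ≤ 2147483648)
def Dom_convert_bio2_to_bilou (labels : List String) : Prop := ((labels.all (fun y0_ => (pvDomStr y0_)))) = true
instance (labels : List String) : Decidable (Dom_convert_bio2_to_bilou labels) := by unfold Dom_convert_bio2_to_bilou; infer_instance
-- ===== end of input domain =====

-- B replaces A's two-phase structure (find mention offsets, then overwrite an all-"O" array)
-- with a single pass emitting each BILOU tag directly, using one lookahead and an inside-flag.

-- ===== PORT A =====
-- x[0] of a label; raises IndexError on "" in Python (excluded by Pre_), the port defaults to ' ' there.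
def pvPrefix (x : String) : Char := (PySem.Str.pyGet? x 0).getD ' '

-- prefixes = [x[0] for x in labels]; prefixes.append("O").  (Python holds 1-char strings;
-- the later prefixes[end+1][0] re-indexes such a 1-char string — the identity; the port keeps the Char.)
def pvPrefixes (labels : List String) : List Char := labels.map pvPrefix ++ ['O']

-- while prefixes[end+1][0] == "I": end += 1   (never out of range in Python: prefixes ends in 'O')
def pvScanEnd (prefixes : List Char) (e : Nat) : Nat :=
  if h : (PySem.List.pyGet? prefixes ((e : Int) + 1)).getD ' ' = 'I' then
    pvScanEnd prefixes (e + 1)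
  else e
termination_by prefixes.length - e
decreasing_by
  rcases hg : PySem.List.pyGet? prefixes ((e : Int) + 1) with _ | c
  · rw [hg] at h; simp at h
  · rw [hg] at h; simp at h; subst h
    have h2 : ((e : Int) + 1) = ((e + 1 : Nat) : Int) := by push_cast; ring
    rw [h2, PySem.List.pyGet?_natCast] at hg
    obtain ⟨hlt, _⟩ := List.getElem?_eq_some_iff.mp hg
    omega

-- needed by pvOffLoop's termination: i never decreases across the inner while
theorem pvScanEnd_ge (prefixes : List Char) (e : Nat) : e ≤ pvScanEnd prefixes e := by
  fun_induction pvScanEnd prefixes e with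
  | case1 e h ih => omega
  | case2 e h => omega

-- the outer while of get_bio2_mention_offsets
def pvOffLoop (labels : List String) (prefixes : List Char) (i : Nat) : List (Nat × Nat) :=
  if _h : i < labels.length then
    if (PySem.List.pyGet? prefixes (i : Int)).getD ' ' = 'B' then
      (i, pvScanEnd prefixes i) :: pvOffLoop labels prefixes (pvScanEnd prefixes i + 1)
    else
      pvOffLoop labels prefixes (i + 1)
  else []
termination_by labels.length - i
decreasing_by
  · have := pvScanEnd_ge prefixes i; omega
  · omega

def get_bio2_mention_offsets (labels : List String) : List (Nat × Nat) :=
  pvOffLoop labels (pvPrefixes labels) 0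

-- the body of A's fill loop: the writes done for one (beg, end) offset
def pvWrite (labels : List String) (arr : List String) (beg e : Nat) : List String :=
  let etype := PySem.Str.slice ((PySem.List.pyGet? labels (beg : Int)).getD "") (some 2) none
  if 1 < 1 + e - beg then
    (PySem.List.pyRange ((beg : Int) + 1) (e : Int) 1).foldl
      (fun a ins => PySem.List.pySetD a ins ("I-" ++ etype))
      (PySem.List.pySetD (PySem.List.pySetD arr (beg : Int) ("B-" ++ etype)) (e : Int) ("L-" ++ etype))
  else PySem.List.pySetD arr (beg : Int) ("U-" ++ etype)

def pvFillLoop (labels : List String) : List (Nat × Nat) → List String → List String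
  | [], arr => arr
  | (beg, e) :: rest, arr => pvFillLoop labels rest (pvWrite labels arr beg e)

def convert_bio2_to_bilou (labels : List String) : List String :=
  pvFillLoop labels (get_bio2_mention_offsets labels) (List.replicate labels.length "O")

-- ===== PORT B =====
-- single pass; cur = entity type of the most recent B, inside = still within that mention
def pvAltLoop (cur : String) (inside : Bool) : List String → List String
  | [] => []
  | lab :: rest =>
    let p := (PySem.Str.pyGet? lab 0).getD ' '
    let nxt := match rest with
      | [] => 'O'
      | r :: _ => (PySem.Str.pyGet? r 0).getD ' '
    if p = 'B' then
      let cur' := PySem.Str.slice lab (some 2) none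
      if nxt = 'I' then ("B-" ++ cur') :: pvAltLoop cur' true rest
      else ("U-" ++ cur') :: pvAltLoop cur' false rest
    else if p = 'I' ∧ inside = true then
      if nxt = 'I' then ("I-" ++ cur) :: pvAltLoop cur inside rest
      else ("L-" ++ cur) :: pvAltLoop cur false rest
    else
      "O" :: pvAltLoop cur false rest

def convert_bio2_to_bilou_alt (labels : List String) : List String := pvAltLoop "" false labels

-- ===== PRECONDITION & SPEC =====
-- Pre_ excludes lists containing the empty string, on which the Python A raises IndexError (x[0]).
def Pre_convert_bio2_to_bilou (labels : List String) : Prop := ∀ l ∈ labels, l ≠ ""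
instance (labels : List String) : Decidable (Pre_convert_bio2_to_bilou labels) := by
  unfold Pre_convert_bio2_to_bilou; infer_instance

def pvWitness_convert_bio2_to_bilou : List String := ["B-PER", "I-PER", "O", "B-LOC", "I", "U"]

def Spec_convert_bio2_to_bilou (labels : List String) (out : List String) : Prop := out = convert_bio2_to_bilou_alt labels
instance (labels : List String) (out : List String) : Decidable (Spec_convert_bio2_to_bilou labels out) := by unfold Spec_convert_bio2_to_bilou; infer_instance

-- ===== CLAIM (what is proved, stated in full; the proofs are below) =====
def Claim_equal_convert_bio2_to_bilou : Prop := ∀ (labels : List String), Dom_convert_bio2_to_bilou labels → Pre_convert_bio2_to_bilou labels → Spec_convert_bio2_to_bilou labels (convert_bio2_to_bilou labels)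

-- ===== LEMMAS AND PROOFS =====

def pvShift (k : Nat) (p : Nat × Nat) : Nat × Nat := (p.1 + k, p.2 + k)

-- the common reference form: recursion over whole mentions
def pvMention (etype : String) (m : Nat) : List String :=
  if m = 0 then ["U-" ++ etype]
  else ("B-" ++ etype) :: (List.replicate (m - 1) ("I-" ++ etype) ++ ["L-" ++ etype])

def pvSpec : List String → List String
  | [] => []
  | lab :: rest =>
    if pvPrefix lab = 'B' then
      pvMention (PySem.Str.slice lab (some 2) none) (rest.takeWhile (fun r => pvPrefix r = 'I')).length
        ++ pvSpec (rest.dropWhile (fun r => pvPrefix r = 'I'))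
    else "O" :: pvSpec rest
termination_by xs => xs.length
decreasing_by
  · exact Nat.lt_succ_of_le (List.length_dropWhile_le _ _)
  · exact Nat.lt_succ_self _

-- ---- characterising A's inner while ----
theorem pvScanEnd_eq (ps : List Char) (e : Nat) :
    pvScanEnd ps e = e + ((ps.drop (e+1)).takeWhile (· == 'I')).length := by
  fun_induction pvScanEnd ps e with
  | case1 e h ih =>
    rw [ih]
    have h2 : ((e : Int) + 1) = ((e + 1 : Nat) : Int) := by push_cast; ring
    rw [h2, PySem.List.pyGet?_natCast] at h
    rcases hg : ps[e+1]? with _ | c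
    · rw [hg] at h; simp at h
    · rw [hg] at h; simp at h; subst h
      obtain ⟨hlt, hv⟩ := List.getElem?_eq_some_iff.mp hg
      rw [List.drop_eq_getElem_cons hlt, hv]
      simp
      omega
  | case2 e h =>
    have h2 : ((e : Int) + 1) = ((e + 1 : Nat) : Int) := by push_cast; ring
    rw [h2, PySem.List.pyGet?_natCast] at h
    rcases hg : ps[e+1]? with _ | c
    · have hle := List.getElem?_eq_none_iff.mp hg
      rw [List.drop_eq_nil_of_le hle]; simp
    · rw [hg] at h; simp at h
      obtain ⟨hlt, hv⟩ := List.getElem?_eq_some_iff.mp hg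
      rw [List.drop_eq_getElem_cons hlt, hv]
      simp [h]

theorem pvScanEnd_cons (c : Char) (ps : List Char) (e : Nat) :
    pvScanEnd (c :: ps) (e+1) = pvScanEnd ps e + 1 := by
  rw [pvScanEnd_eq, pvScanEnd_eq, List.drop_succ_cons]
  omega

-- ---- shifting the outer while across a cons / an append ----
theorem pvOffLoop_cons (x : String) (labels : List String) (c : Char) (ps : List Char) (i : Nat) :
    pvOffLoop (x :: labels) (c :: ps) (i+1) = (pvOffLoop labels ps i).map (pvShift 1) := by
  fun_induction pvOffLoop labels ps i with
  | case1 i h hB ih =>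
    rw [pvOffLoop.eq_def, dif_pos (by simp; omega : i + 1 < (x :: labels).length)]
    have hc : (((i+1 : Nat)) : Int) = ((i : Nat) : Int) + 1 := by push_cast; ring
    rw [hc, PySem.List.pyGet?_cons_succ]
    rw [if_pos hB, pvScanEnd_cons, ih]
    simp [pvShift]
  | case2 i h hB ih =>
    rw [pvOffLoop.eq_def, dif_pos (by simp; omega : i + 1 < (x :: labels).length)]
    have hc : (((i+1 : Nat)) : Int) = ((i : Nat) : Int) + 1 := by push_cast; ring
    rw [hc, PySem.List.pyGet?_cons_succ]
    rw [if_neg hB]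
    exact ih
  | case3 i h =>
    rw [pvOffLoop.eq_def, dif_neg (by simp at h ⊢; omega)]
    simp

theorem pvOffLoop_append (xs : List String) : ∀ (cs : List Char) (labels : List String) (ps : List Char),
    xs.length = cs.length →
    pvOffLoop (xs ++ labels) (cs ++ ps) xs.length = (pvOffLoop labels ps 0).map (pvShift xs.length) := by
  induction xs with
  | nil =>
    intro cs labels ps h
    have hcs : cs = [] := List.eq_nil_iff_length_eq_zero.mpr h.symm
    subst hcs
    have hid : pvShift 0 = id := by funext p; simp [pvShift]
    simp [hid]
  | cons x xs ih =>
    intro cs labels ps h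
    cases cs with
    | nil => simp at h
    | cons c cs' =>
      simp only [List.cons_append, List.length_cons]
      rw [pvOffLoop_cons x (xs ++ labels) c (cs' ++ ps) xs.length]
      rw [ih cs' labels ps (by simpa using h)]
      rw [List.map_map]
      apply List.map_congr_left
      intro a _
      simp [pvShift, Function.comp, Nat.add_assoc]

theorem pvPrefixes_cons (lab : String) (rest : List String) :
    pvPrefixes (lab :: rest) = pvPrefix lab :: pvPrefixes rest := by
  simp [pvPrefixes]

-- ---- the offsets of a list, by its leading structure ----
theorem pvOffsets_cons_not_B (lab : String) (rest : List String) (h : pvPrefix lab ≠ 'B') :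
    get_bio2_mention_offsets (lab :: rest) = (get_bio2_mention_offsets rest).map (pvShift 1) := by
  unfold get_bio2_mention_offsets
  rw [pvPrefixes_cons, pvOffLoop.eq_def, dif_pos (by simp : 0 < (lab :: rest).length)]
  have h0 : (PySem.List.pyGet? (pvPrefix lab :: pvPrefixes rest) ((0 : Nat) : Int)).getD ' ' = pvPrefix lab := by
    simp
  rw [if_neg (by rw [h0]; exact h)]
  exact pvOffLoop_cons lab rest (pvPrefix lab) (pvPrefixes rest) 0

theorem pvOffsets_cons_B (lab : String) (run rest' : List String)
    (hB : pvPrefix lab = 'B')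
    (hrun : ∀ r ∈ run, pvPrefix r = 'I')
    (hhd : ∀ r rs, rest' = r :: rs → pvPrefix r ≠ 'I') :
    get_bio2_mention_offsets (lab :: (run ++ rest'))
      = (0, run.length) :: (get_bio2_mention_offsets rest').map (pvShift (run.length + 1)) := by
  have hps : pvPrefixes (lab :: (run ++ rest')) = (pvPrefix lab :: run.map pvPrefix) ++ pvPrefixes rest' := by
    simp [pvPrefixes]
  unfold get_bio2_mention_offsets
  rw [hps, pvOffLoop.eq_def, dif_pos (by simp : 0 < (lab :: (run ++ rest')).length)]
  have h0 : (PySem.List.pyGet? ((pvPrefix lab :: run.map pvPrefix) ++ pvPrefixes rest') ((0 : Nat) : Int)).getD ' ' = pvPrefix lab := by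
    simp
  rw [if_pos (by rw [h0]; exact hB)]
  have htw : (pvPrefixes rest').takeWhile (· == 'I') = [] := by
    cases rest' with
    | nil => simp [pvPrefixes]
    | cons r rs =>
      rw [pvPrefixes_cons]
      have := hhd r rs rfl
      simp [this]
  have hsc : pvScanEnd ((pvPrefix lab :: run.map pvPrefix) ++ pvPrefixes rest') 0 = run.length := by
    rw [pvScanEnd_eq]
    have hd : ((pvPrefix lab :: run.map pvPrefix) ++ pvPrefixes rest').drop (0+1)
        = run.map pvPrefix ++ pvPrefixes rest' := by simp
    rw [hd, List.takeWhile_append_of_pos (by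
      intro c hc
      obtain ⟨r, hr, rfl⟩ := List.mem_map.mp hc
      simp [hrun r hr]), htw]
    simp
  rw [hsc]
  have := pvOffLoop_append (lab :: run) (pvPrefix lab :: run.map pvPrefix) rest' (pvPrefixes rest') (by simp)
  simp only [List.cons_append, List.length_cons] at this
  exact congrArg _ this

-- ---- shifting the fill across an append ----
theorem pvSet_append (pre arr : List String) (b : Nat) (v : String) :
    PySem.List.pySetD (pre ++ arr) (((b + pre.length : Nat)) : Int) v
      = pre ++ PySem.List.pySetD arr ((b : Nat) : Int) v := by
  rw [PySem.List.pySetD_natCast, PySem.List.pySetD_natCast, Nat.add_comm b pre.length]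
  induction pre with
  | nil => simp
  | cons a l ih =>
    simp only [List.cons_append, List.length_cons]
    rw [show l.length + 1 + b = (l.length + b) + 1 by omega, List.set_cons_succ, ih]

theorem pvRange_shift (a b k : Int) :
    PySem.List.pyRange (a + k) (b + k) 1 = (PySem.List.pyRange a b 1).map (· + k) := by
  rw [PySem.List.pyRange_one, PySem.List.pyRange_one, List.map_map]
  have h : b + k - (a + k) = b - a := by ring
  rw [h]
  apply List.map_congr_left
  intro j _
  simp [Function.comp]
  ring

theorem pvFoldSet_append (is : List Int) : ∀ (pre arr : List String) (v : String),
    (∀ i ∈ is, 0 ≤ i) →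
    is.foldl (fun a i => PySem.List.pySetD a (i + (pre.length : Int)) v) (pre ++ arr)
      = pre ++ is.foldl (fun a i => PySem.List.pySetD a i v) arr := by
  induction is with
  | nil => intro pre arr v _; simp
  | cons i is ih =>
    intro pre arr v hpos
    simp only [List.foldl_cons]
    have h0 : 0 ≤ i := hpos i (by simp)
    have hstep : PySem.List.pySetD (pre ++ arr) (i + (pre.length : Int)) v = pre ++ PySem.List.pySetD arr i v := by
      have h1 : i + (pre.length : Int) = ((i.toNat + pre.length : Nat) : Int) := by omega
      have h2 : PySem.List.pySetD arr ((i.toNat : Nat) : Int) v = PySem.List.pySetD arr i v := by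
        rw [PySem.List.pySetD_natCast, PySem.List.pySetD_of_nonneg _ _ h0]
      rw [h1, pvSet_append pre arr i.toNat v, h2]
    rw [hstep, ih pre (PySem.List.pySetD arr i v) v (fun x hx => hpos x (by simp [hx]))]

theorem pvWrite_append (xs pre : List String) (h : xs.length = pre.length)
    (labels arr : List String) (beg e : Nat) :
    pvWrite (xs ++ labels) (pre ++ arr) (beg + xs.length) (e + xs.length)
      = pre ++ pvWrite labels arr beg e := by
  rw [h]
  simp only [pvWrite]
  have hety : (PySem.List.pyGet? (xs ++ labels) (((beg + pre.length : Nat)) : Int)).getD ""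
      = (PySem.List.pyGet? labels ((beg : Nat) : Int)).getD "" := by
    rw [PySem.List.pyGet?_natCast, PySem.List.pyGet?_natCast,
      List.getElem?_append_right (by omega : xs.length ≤ beg + pre.length)]
    rw [show beg + pre.length - xs.length = beg by omega]
  rw [hety]
  have hcond : (1 < 1 + (e + pre.length) - (beg + pre.length)) ↔ (1 < 1 + e - beg) := by omega
  by_cases hc : 1 < 1 + e - beg
  · rw [if_pos (hcond.mpr hc), if_pos hc]
    rw [pvSet_append pre arr beg _, pvSet_append pre _ e _]
    have hr1 : (((beg + pre.length : Nat)) : Int) + 1 = ((beg : Int) + 1) + (pre.length : Int) := by push_cast; ring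
    have hr2 : (((e + pre.length : Nat)) : Int) = (e : Int) + (pre.length : Int) := by push_cast; ring
    rw [hr1, hr2, pvRange_shift ((beg : Int) + 1) (e : Int) (pre.length : Int), List.foldl_map]
    exact pvFoldSet_append _ pre _ _ (by
      intro i hi
      have := (PySem.List.mem_pyRange_one).mp hi
      omega)
  · rw [if_neg (by rw [hcond]; exact hc), if_neg hc]
    exact pvSet_append pre arr beg _

theorem pvFill_append (offs : List (Nat × Nat)) : ∀ (xs pre labels arr : List String),
    xs.length = pre.length →
    pvFillLoop (xs ++ labels) (offs.map (pvShift xs.length)) (pre ++ arr)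
      = pre ++ pvFillLoop labels offs arr := by
  induction offs with
  | nil => intro xs pre labels arr _; simp [pvFillLoop]
  | cons o offs ih =>
    intro xs pre labels arr h
    obtain ⟨beg, e⟩ := o
    simp only [List.map_cons, pvShift, pvFillLoop]
    rw [pvWrite_append xs pre h labels arr beg e]
    exact ih xs pre labels (pvWrite labels arr beg e) h

-- ---- what one mention write does to an all-"O" array ----
theorem pvFoldSet_getElem? (is : List Int) : ∀ (arr : List String) (v : String) (j : Nat),
    (∀ i ∈ is, 0 ≤ i) →
    (is.foldl (fun a i => PySem.List.pySetD a i v) arr)[j]?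
      = if ((j : Int) ∈ is ∧ j < arr.length) then some v else arr[j]? := by
  induction is with
  | nil => intro arr v j _; simp
  | cons i is ih =>
    intro arr v j hpos
    have h0 : 0 ≤ i := hpos i (by simp)
    simp only [List.foldl_cons]
    rw [ih _ v j (fun x hx => hpos x (by simp [hx]))]
    rw [PySem.List.pySetD_of_nonneg _ _ h0, List.length_set, List.getElem?_set]
    by_cases hj : j < arr.length
    · by_cases hm : (j : Int) ∈ is
      · simp [hm, hj, List.mem_cons]
      · by_cases hij : (j : Int) = i
        · have hn : i.toNat = j := by omega
          simp [hij, hn, hj, List.mem_cons]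
        · have hn : ¬ i.toNat = j := by omega
          simp [hm, hij, hn, List.mem_cons]
    · by_cases hij : i.toNat = j
      · simp [hj, hij, List.mem_cons]
      · simp [hj, hij, List.mem_cons]

theorem pvWrite_U (lab : String) (rest : List String) (n' : Nat) :
    pvWrite (lab :: rest) ("O" :: List.replicate n' "O") 0 0
      = ("U-" ++ PySem.Str.slice lab (some 2) none) :: List.replicate n' "O" := by
  simp only [pvWrite]
  rw [if_neg (by norm_num)]
  rw [PySem.List.pySetD_of_nonneg _ _ (by norm_num : (0 : Int) ≤ ((0 : Nat) : Int))]
  simp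

theorem pvWrite_B (lab : String) (rest : List String) (m n' : Nat) (hm : 1 ≤ m)
    (hlen : rest.length = m + n') :
    pvWrite (lab :: rest) (List.replicate (rest.length + 1) "O") 0 m
      = (("B-" ++ PySem.Str.slice lab (some 2) none)
          :: (List.replicate (m - 1) ("I-" ++ PySem.Str.slice lab (some 2) none)
              ++ ["L-" ++ PySem.Str.slice lab (some 2) none])) ++ List.replicate n' "O" := by
  simp only [pvWrite]
  have he : (PySem.List.pyGet? (lab :: rest) ((0 : Nat) : Int)).getD "" = lab := by simp
  rw [he, if_pos (by omega : 1 < 1 + m - 0)]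
  apply List.ext_getElem?_iff.mpr
  intro j
  have hz : (((0 : Nat)) : Int) + 1 = (1 : Int) := by norm_num
  rw [hz]
  rw [pvFoldSet_getElem? _ _ _ j (by
    intro i hi
    have := (PySem.List.mem_pyRange_one).mp hi
    omega)]
  have hmem : ((j : Int) ∈ PySem.List.pyRange 1 (m : Int) 1) ↔ (1 ≤ j ∧ j < m) := by
    rw [PySem.List.mem_pyRange_one]; omega
  simp only [hmem]
  rw [PySem.List.pySetD_natCast, PySem.List.pySetD_natCast]
  simp only [List.length_set, List.length_replicate, List.getElem?_set, List.getElem?_replicate,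
    List.getElem?_append, List.getElem?_cons, List.length_cons, List.length_append,
    List.length_nil, Nat.zero_add]
  split_ifs <;> first | rfl | omega

theorem pvDropWhile_head (p : String → Bool) (l : List String) :
    ∀ r rs, l.dropWhile p = r :: rs → p r = false := by
  induction l with
  | nil => intro r rs h; cases h
  | cons a l ih =>
    intro r rs h
    rw [List.dropWhile_cons] at h
    by_cases hp : p a
    · rw [if_pos hp] at h; exact ih r rs h
    · rw [if_neg hp] at h
      cases h
      simpa using hp

-- ---- A equals the reference form ----
theorem pvA_B_case (lab : String) (run rest' : List String)
    (hB : pvPrefix lab = 'B')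
    (hrun : ∀ r ∈ run, pvPrefix r = 'I')
    (hhd : ∀ r rs, rest' = r :: rs → pvPrefix r ≠ 'I')
    (ihs : convert_bio2_to_bilou rest' = pvSpec rest') :
    convert_bio2_to_bilou (lab :: (run ++ rest'))
      = pvMention (PySem.Str.slice lab (some 2) none) run.length ++ pvSpec rest' := by
  unfold convert_bio2_to_bilou at *
  rw [pvOffsets_cons_B lab run rest' hB hrun hhd]
  cases run with
  | nil =>
    simp only [List.nil_append, List.length_nil, List.length_cons, pvFillLoop]
    rw [List.replicate_succ, pvWrite_U lab rest' rest'.length]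
    have := pvFill_append (get_bio2_mention_offsets rest') [lab]
      ["U-" ++ PySem.Str.slice lab (some 2) none] rest' (List.replicate rest'.length "O") (by simp)
    simp only [List.singleton_append, List.length_cons, List.length_nil, Nat.zero_add] at this
    rw [show (0:Nat) + 1 = 1 by rfl, this, ihs]
    simp [pvMention]
  | cons r1 rs1 =>
    simp only [List.length_cons, pvFillLoop]
    have hlen2 : ((r1 :: rs1) ++ rest' : List String).length = (rs1.length + 1) + rest'.length := by
      simp; omega
    rw [pvWrite_B lab ((r1 :: rs1) ++ rest') (rs1.length + 1) rest'.length (by omega) (by simp; try omega)]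
    have hfa := pvFill_append (get_bio2_mention_offsets rest') (lab :: r1 :: rs1)
      (("B-" ++ PySem.Str.slice lab (some 2) none)
        :: (List.replicate (rs1.length + 1 - 1) ("I-" ++ PySem.Str.slice lab (some 2) none)
            ++ ["L-" ++ PySem.Str.slice lab (some 2) none]))
      rest' (List.replicate rest'.length "O") (by simp)
    simp only [List.cons_append, List.length_cons] at hfa ⊢
    rw [hfa, ihs]
    simp [pvMention]

theorem pvA_eq_spec (labels : List String) : convert_bio2_to_bilou labels = pvSpec labels := by
  fun_induction pvSpec labels with
  | case1 => simp [convert_bio2_to_bilou, get_bio2_mention_offsets, pvPrefixes, pvOffLoop, pvFillLoop]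
  | case2 lab rest hB ih =>
    have hsplit : rest.takeWhile (fun r => pvPrefix r = 'I') ++ rest.dropWhile (fun r => pvPrefix r = 'I') = rest :=
      List.takeWhile_append_dropWhile
    have hrun : ∀ r ∈ rest.takeWhile (fun r => pvPrefix r = 'I'), pvPrefix r = 'I' := by
      intro r hr; simpa using List.mem_takeWhile_imp hr
    have hhd : ∀ r rs, rest.dropWhile (fun r => pvPrefix r = 'I') = r :: rs → pvPrefix r ≠ 'I' := by
      intro r rs hdw
      have := pvDropWhile_head (fun r => decide (pvPrefix r = 'I')) rest r rs hdw
      simpa using this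
    have hmain := pvA_B_case lab (rest.takeWhile (fun r => pvPrefix r = 'I'))
      (rest.dropWhile (fun r => pvPrefix r = 'I')) hB hrun hhd ih
    rw [hsplit] at hmain
    exact hmain
  | case3 lab rest hB ih =>
    unfold convert_bio2_to_bilou at *
    rw [pvOffsets_cons_not_B lab rest hB]
    rw [show (lab :: rest : List String).length = rest.length + 1 by simp, List.replicate_succ]
    have := pvFill_append (get_bio2_mention_offsets rest) [lab] ["O"] rest (List.replicate rest.length "O") (by simp)
    simp only [List.singleton_append, List.length_cons, List.length_nil, Nat.zero_add] at this
    rw [this, ih]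

-- ---- B equals the reference form ----
theorem pvAltLoop_cons (cur : String) (inside : Bool) (lab : String) (rest : List String) :
    pvAltLoop cur inside (lab :: rest) =
      (if (PySem.Str.pyGet? lab 0).getD ' ' = 'B' then
         if (match rest with
             | [] => 'O'
             | r :: _ => (PySem.Str.pyGet? r 0).getD ' ') = 'I' then
           ("B-" ++ PySem.Str.slice lab (some 2) none) :: pvAltLoop (PySem.Str.slice lab (some 2) none) true rest
         else ("U-" ++ PySem.Str.slice lab (some 2) none) :: pvAltLoop (PySem.Str.slice lab (some 2) none) false rest
       else if (PySem.Str.pyGet? lab 0).getD ' ' = 'I' ∧ inside = true then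
         if (match rest with
             | [] => 'O'
             | r :: _ => (PySem.Str.pyGet? r 0).getD ' ') = 'I' then
           ("I-" ++ cur) :: pvAltLoop cur inside rest
         else ("L-" ++ cur) :: pvAltLoop cur false rest
       else "O" :: pvAltLoop cur false rest) := rfl

theorem pvAlt_run (cur : String) : ∀ (run rest' : List String),
    (∀ r ∈ run, pvPrefix r = 'I') → (∀ r rs, rest' = r :: rs → pvPrefix r ≠ 'I') → run ≠ [] →
    pvAltLoop cur true (run ++ rest')
      = (List.replicate (run.length - 1) ("I-" ++ cur) ++ ["L-" ++ cur]) ++ pvAltLoop cur false rest' := by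
  intro run
  induction run with
  | nil => intro rest' _ _ h; exact absurd rfl h
  | cons r1 rs ih =>
    intro rest' hrun hhd _
    have hp1 : (PySem.List.pyGet? r1.toList 0).getD ' ' = 'I' := by
      have := hrun r1 (by simp); simpa [pvPrefix] using this
    cases rs with
    | nil =>
      simp only [List.cons_append, List.nil_append]
      rw [pvAltLoop_cons]
      cases rest' with
      | nil => simp [hp1]
      | cons r2 rs2 =>
        have h2 : (PySem.List.pyGet? r2.toList 0).getD ' ' ≠ 'I' := by
          have := hhd r2 rs2 rfl; simpa [pvPrefix] using this
        simp [hp1, h2]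
    | cons r2 rs2 =>
      have hp2 : (PySem.List.pyGet? r2.toList 0).getD ' ' = 'I' := by
        have := hrun r2 (by simp); simpa [pvPrefix] using this
      simp only [List.cons_append]
      rw [pvAltLoop_cons]
      rw [show r2 :: (rs2 ++ rest') = (r2 :: rs2) ++ rest' from rfl]
      rw [ih rest' (fun r hr => hrun r (by simp [hr])) hhd (by simp)]
      simp [hp1, hp2, List.replicate_succ]

theorem pvAlt_false (labels : List String) : ∀ cur, pvAltLoop cur false labels = pvSpec labels := by
  fun_induction pvSpec labels with
  | case1 => intro cur; simp [pvAltLoop]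
  | case2 lab rest hB ih =>
    intro cur
    have hp : (PySem.Str.pyGet? lab 0).getD ' ' = 'B' := by simpa [pvPrefix] using hB
    have hsplit : rest.takeWhile (fun r => pvPrefix r = 'I') ++ rest.dropWhile (fun r => pvPrefix r = 'I') = rest :=
      List.takeWhile_append_dropWhile
    have hhd : ∀ r rs, rest.dropWhile (fun r => pvPrefix r = 'I') = r :: rs → pvPrefix r ≠ 'I' := by
      intro r rs hdw
      have := pvDropWhile_head (fun r => decide (pvPrefix r = 'I')) rest r rs hdw
      simpa using this
    cases hrun : rest.takeWhile (fun r => pvPrefix r = 'I') with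
    | nil =>
      have hr' : rest.dropWhile (fun r => pvPrefix r = 'I') = rest := by
        conv_rhs => rw [← hsplit, hrun]
        simp
      rw [hr'] at ih
      have hp2 : (PySem.List.pyGet? lab.toList 0).getD ' ' = 'B' := by simpa using hp
      cases rest with
      | nil => simp [pvAltLoop, hp2, pvMention, pvSpec]
      | cons r rs =>
        have hpr : pvPrefix r ≠ 'I' := by
          by_cases hx : pvPrefix r = 'I'
          · rw [List.takeWhile_cons] at hrun; simp [hx] at hrun
          · exact hx
        have hpr' : (PySem.List.pyGet? r.toList 0).getD ' ' ≠ 'I' := by simpa [pvPrefix] using hpr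
        rw [pvAltLoop_cons]
        rw [hr', ih (PySem.Str.slice lab (some 2) none)]
        simp [hp2, hpr', pvMention]
    | cons r1 rs1 =>
      have hmemtw : ∀ x ∈ rest.takeWhile (fun r => pvPrefix r = 'I'), pvPrefix x = 'I' := by
        intro x hx; simpa using List.mem_takeWhile_imp hx
      have hp2 : (PySem.List.pyGet? lab.toList 0).getD ' ' = 'B' := by simpa using hp
      have hp1 : (PySem.List.pyGet? r1.toList 0).getD ' ' = 'I' := by
        have := hmemtw r1 (by rw [hrun]; simp); simpa [pvPrefix] using this
      have hrest : rest = r1 :: (rs1 ++ rest.dropWhile (fun r => pvPrefix r = 'I')) := by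
        conv_lhs => rw [← hsplit, hrun]
        simp
      conv_lhs => rw [hrest]
      rw [pvAltLoop_cons]
      rw [show r1 :: (rs1 ++ rest.dropWhile (fun r => pvPrefix r = 'I'))
            = (r1 :: rs1) ++ rest.dropWhile (fun r => pvPrefix r = 'I') from rfl]
      rw [pvAlt_run (PySem.Str.slice lab (some 2) none) (r1 :: rs1) _
        (fun r hr => hmemtw r (by rw [hrun]; exact hr)) hhd (by simp)]
      rw [ih (PySem.Str.slice lab (some 2) none)]
      simp [hp2, hp1, pvMention]
  | case3 lab rest hB ih =>
    intro cur
    have hp : (PySem.Str.pyGet? lab 0).getD ' ' ≠ 'B' := by simpa [pvPrefix] using hB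
    rw [pvAltLoop_cons, if_neg hp, if_neg (by simp)]
    rw [ih cur]

theorem pvB_eq_spec (labels : List String) : convert_bio2_to_bilou_alt labels = pvSpec labels :=
  pvAlt_false labels ""

-- ===== VERDICT (by name: the statement is the Claim_ definition above) =====
theorem convert_bio2_to_bilou_spec : Claim_equal_convert_bio2_to_bilou := by
  intro labels _ _
  unfold Spec_convert_bio2_to_bilou
  rw [pvA_eq_spec, pvB_eq_spec]
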